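-- pv_equiv track=rewrite | github.com/mango606/baekjoon-hub | 백준/Silver/17086. 아기 상어 2/아기 상어 2.py | bfs
-- ===== SOURCE A (Python) =====
-- from collections import deque
--
-- def bfs(grid, N, M):
--     directions = [(-1, -1), (-1, 0), (-1, 1), (0, -1), (0, 1), (1, -1), (1, 0), (1, 1)]
--     queue = deque()
--     visited = [[False for _ in range(M)] for _ in range(N)]
--
--     # 상어가 있는 위치를 찾아 큐에 넣고, 방문 처리한다
--     for i in range(N):
--         for j in range(M):
--             if grid[i][j] == 1:
--                 queue.append((i, j, 0))
--                 visited[i][j] = True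
--
--     max_distance = 0
--
--     while queue:
--         x, y, distance = queue.popleft()
--         max_distance = max(max_distance, distance)
--
--         for dx, dy in directions:
--             nx, ny = x + dx, y + dy
--
--             if 0 <= nx < N and 0 <= ny < M and not visited[nx][ny]:
--                 visited[nx][ny] = True
--                 queue.append((nx, ny, distance + 1))
--
--     return max_distance
-- ===== SOURCE B (Python) =====
-- def bfs(grid, N, M):
--     sharks = [(i, j) for i in range(N) for j in range(M) if grid[i][j] == 1]
--     visited = set(sharks)
--     frontier = sharks
--     level = 0
--     while frontier:
--         nxt = []
--         for x, y in frontier: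
--             for nx in (x - 1, x, x + 1):
--                 for ny in (y - 1, y, y + 1):
--                     if 0 <= nx < N and 0 <= ny < M and (nx, ny) not in visited:
--                         visited.add((nx, ny))
--                         nxt.append((nx, ny))
--         frontier = nxt
--         level += 1
--     return level - 1 if sharks else 0
-- ===== Notes on version B (the rewrite author's own statement) =====
-- stated objective: alternative
-- what changed: Replaces A's FIFO deque of (x,y,distance) triples and boolean visited matrix by a level-synchronous frontier BFS over a visited set of coordinate pairs: sharks are collected by a comprehension, whole waves are expanded at once via nested 3x3 neighbour loops, distance is implicit in the wave counter, and the answer is level-1 (0 with no sharks).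
import Mathlib
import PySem

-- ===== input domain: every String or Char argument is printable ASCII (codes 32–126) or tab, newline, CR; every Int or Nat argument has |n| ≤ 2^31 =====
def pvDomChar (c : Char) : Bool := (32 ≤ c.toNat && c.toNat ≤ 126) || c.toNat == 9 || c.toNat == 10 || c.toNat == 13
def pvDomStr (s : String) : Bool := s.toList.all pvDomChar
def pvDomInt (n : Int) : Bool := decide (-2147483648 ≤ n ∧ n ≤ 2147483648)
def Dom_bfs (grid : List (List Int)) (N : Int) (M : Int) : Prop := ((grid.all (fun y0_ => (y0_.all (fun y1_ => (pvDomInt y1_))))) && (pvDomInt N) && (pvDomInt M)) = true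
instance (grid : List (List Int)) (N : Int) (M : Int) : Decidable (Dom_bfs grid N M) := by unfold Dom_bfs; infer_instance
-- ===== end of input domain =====

-- B replaces A's FIFO deque of (x, y, distance) triples and boolean visited matrix by a
-- level-synchronous frontier BFS over a visited SET of coordinate pairs: sharks come from a
-- comprehension, waves are expanded whole through nested 3x3 neighbour loops, the distance is
-- the wave counter and the answer is level - 1 (0 with no sharks); objective: alternative.

-- ===== PORT A =====
-- the 8 directions of A
def directions8 : List (Int × Int) :=
  [(-1, -1), (-1, 0), (-1, 1), (0, -1), (0, 1), (1, -1), (1, 0), (1, 1)]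

-- visited[x][y]; A's loops read it only under the guard 0 ≤ x < N, 0 ≤ y < M, where the
-- Python lookup on the N×M matrix never raises
def getCell (v : List (List Bool)) (x y : Int) : Option Bool :=
  (PySem.List.pyGet? v x).bind (fun row => PySem.List.pyGet? row y)

-- visited[x][y] = True (only ever reached with 0 ≤ x, 0 ≤ y after a successful read)
def setCell (v : List (List Bool)) (x y : Int) : List (List Bool) :=
  v.modify x.toNat (fun row => row.set y.toNat true)

-- number of unvisited cells: the termination measure of A's while-loop
def falseCount (v : List (List Bool)) : Nat := (v.map (fun row => row.count false)).sum

-- the `for dx, dy in directions` body of A's while-loop: appends (nx, ny, distance+1)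
-- triples and marks visited
def expandA (N M : Int) (x y dist : Int) :
    List (Int × Int) → List (Int × Int × Int) → List (List Bool) →
    List (Int × Int × Int) × List (List Bool)
  | [], acc, v => (acc, v)
  | (dx, dy) :: ds, acc, v =>
    let nx := x + dx
    let ny := y + dy
    if 0 ≤ nx ∧ nx < N ∧ 0 ≤ ny ∧ ny < M ∧ getCell v nx ny = some false
    then expandA N M x y dist ds (acc ++ [(nx, ny, dist + 1)]) (setCell v nx ny)
    else expandA N M x y dist ds acc v

-- A's while-loop over the deque of (x, y, distance) triples (fuel = a totality guard;
-- the unvisited-cell count plus the queue length shrinks every iteration, so the fuel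
-- supplied by bfs below is never exhausted)
def loopA (N M : Int) : Nat → List (Int × Int × Int) → List (List Bool) → Int → Int
  | 0, _, _, md => md
  | _ + 1, [], _, md => md
  | fuel + 1, (x, y, dist) :: rest, v, md =>
    let md' := max md dist
    let r := expandA N M x y dist directions8 [] v
    loopA N M fuel (rest ++ r.1) r.2 md'

-- the initial scan: for i in range(N): for j in range(M): if grid[i][j] == 1: push (i,j,0), mark
def initA (grid : List (List Int)) (N M : Int) :
    List (Int × Int × Int) × List (List Bool) :=
  (PySem.List.pyRange 0 N 1).foldl (fun st i =>
    (PySem.List.pyRange 0 M 1).foldl (fun st j =>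
      if ((PySem.List.pyGet? grid i).bind (fun row => PySem.List.pyGet? row j)) = some 1
      then (st.1 ++ [(i, j, 0)], setCell st.2 i j)
      else st) st)
    ([], (PySem.List.pyRange 0 N 1).map (fun _ => (PySem.List.pyRange 0 M 1).map (fun _ => false)))

def bfs (grid : List (List Int)) (N : Int) (M : Int) : Int :=
  let st := initA grid N M
  loopA N M (falseCount st.2 + st.1.length) st.1 st.2 0

-- ===== PORT B =====
-- sharks = [(i, j) for i in range(N) for j in range(M) if grid[i][j] == 1]
def sharksB (grid : List (List Int)) (N M : Int) : List (Int × Int) :=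
  (PySem.List.pyRange 0 N 1).flatMap (fun i =>
    ((PySem.List.pyRange 0 M 1).filter (fun j =>
      decide (((PySem.List.pyGet? grid i).bind (fun row => PySem.List.pyGet? row j)) = some 1))).map
      (fun j => (i, j)))

-- all in-bounds cells and the count of cells missing from the visited set: B's termination measure
def cellsNM (N M : Int) : List (Int × Int) :=
  (PySem.List.pyRange 0 N 1).flatMap (fun i => (PySem.List.pyRange 0 M 1).map (fun j => (i, j)))

def unvis (N M : Int) (s : List (Int × Int)) : Nat :=
  ((cellsNM N M).filter (fun p => !(decide (p ∈ s)))).length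

-- innermost: for ny in (y-1, y, y+1): guard, mark into the set, collect into nxt
def scanRow (N M nx : Int) :
    List Int → List (Int × Int) × PySem.Set (Int × Int) →
    List (Int × Int) × PySem.Set (Int × Int)
  | [], st => st
  | ny :: nys, (nxt, s) =>
    if 0 ≤ nx ∧ nx < N ∧ 0 ≤ ny ∧ ny < M ∧ ¬ ((nx, ny) ∈ s)
    then scanRow N M nx nys (nxt ++ [(nx, ny)], PySem.Set.add s (nx, ny))
    else scanRow N M nx nys (nxt, s)

-- middle: for nx in (x-1, x, x+1): scan the three cells of that row
def scanCell (N M y : Int) :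
    List Int → List (Int × Int) × PySem.Set (Int × Int) →
    List (Int × Int) × PySem.Set (Int × Int)
  | [], st => st
  | nx :: nxs, st => scanCell N M y nxs (scanRow N M nx [y - 1, y, y + 1] st)

-- outer: for x, y in frontier
def scanWave (N M : Int) :
    List (Int × Int) → List (Int × Int) × PySem.Set (Int × Int) →
    List (Int × Int) × PySem.Set (Int × Int)
  | [], st => st
  | (x, y) :: ws, st => scanWave N M ws (scanCell N M y [x - 1, x, x + 1] st)

-- B's while-loop: one whole wave per iteration, the level counter is the distance
-- (fuel = the same totality guard, with the missing-from-the-set cell count as measure)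
def loopB (N M : Int) : Nat → List (Int × Int) → PySem.Set (Int × Int) → Int → Int
  | 0, _, _, level => level
  | _ + 1, [], _, level => level
  | fuel + 1, f :: fs, s, level =>
    let r := scanWave N M (f :: fs) ([], s)
    loopB N M fuel r.1 r.2 (level + 1)

def bfs_alt (grid : List (List Int)) (N : Int) (M : Int) : Int :=
  let sharks := sharksB grid N M
  let s0 := PySem.Set.ofList sharks
  let lvl := loopB N M (unvis N M s0 + sharks.length) sharks s0 0
  if sharks.isEmpty then 0 else lvl - 1

-- ===== PRECONDITION & SPEC =====
-- Pre_ excludes exactly the inputs where Python A raises IndexError in its initial scan: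
-- when both loop bounds are positive, the grid must have at least N rows, each of the
-- first N rows at least M entries (with N ≤ 0 or M ≤ 0 the scan never indexes the grid).
def Pre_bfs (grid : List (List Int)) (N : Int) (M : Int) : Prop :=
  N ≤ 0 ∨ M ≤ 0 ∨ (N ≤ grid.length ∧ ∀ row ∈ grid.take N.toNat, M ≤ (row.length : Int))
instance (grid : List (List Int)) (N : Int) (M : Int) : Decidable (Pre_bfs grid N M) := by
  unfold Pre_bfs; infer_instance

def pvWitness_bfs : List (List Int) × Int × Int := ([[0, 1], [0, 0], [0, 0]], 3, 2)

def Spec_bfs (grid : List (List Int)) (N : Int) (M : Int) (out : Int) : Prop := out = bfs_alt grid N M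
instance (grid : List (List Int)) (N : Int) (M : Int) (out : Int) : Decidable (Spec_bfs grid N M out) := by unfold Spec_bfs; infer_instance

-- ===== CLAIM (what is proved, stated in full; the proofs are below) =====
def Claim_equal_bfs : Prop := ∀ (grid : List (List Int)) (N : Int) (M : Int), Dom_bfs grid N M → Pre_bfs grid N M → Spec_bfs grid N M (bfs grid N M)

-- ===== LEMMAS AND PROOFS =====

-- marking a cell that reads back `false` removes exactly one unvisited cell (termination)
theorem count_set_row : ∀ (r : List Bool) (m : Nat), r[m]? = some false →
    (r.set m true).count false + 1 = r.count false := by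
  intro r
  induction r with
  | nil => intro m h; simp at h
  | cons b r ih =>
    intro m h
    cases m with
    | zero => simp_all
    | succ m =>
      simp only [List.getElem?_cons_succ] at h
      simp only [List.set_cons_succ, List.count_cons]
      have := ih m h
      omega

theorem falseCount_modify : ∀ (v : List (List Bool)) (n m : Nat) (r : List Bool),
    v[n]? = some r → r[m]? = some false →
    falseCount (v.modify n (fun row => row.set m true)) + 1 = falseCount v := by
  intro v
  induction v with
  | nil => intro n m r h; simp at h
  | cons row v ih =>
    intro n m r h hr
    cases n with
    | zero =>
      simp only [List.getElem?_cons_zero, Option.some.injEq] at h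
      subst h
      rw [List.modify_zero_cons]
      unfold falseCount
      simp only [List.map_cons, List.sum_cons]
      have := count_set_row row m hr
      omega
    | succ n =>
      simp only [List.getElem?_cons_succ] at h
      rw [List.modify_succ_cons]
      unfold falseCount
      simp only [List.map_cons, List.sum_cons]
      have := ih n m r h hr
      unfold falseCount at this
      omega

theorem falseCount_set {v : List (List Bool)} {x y : Int} (hx : 0 ≤ x) (hy : 0 ≤ y)
    (h : getCell v x y = some false) : falseCount (setCell v x y) + 1 = falseCount v := by
  unfold getCell at h
  rw [PySem.List.pyGet?_of_nonneg v hx] at h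
  rcases hv : v[x.toNat]? with _ | r
  · rw [hv] at h; simp at h
  · rw [hv] at h
    simp only [Option.bind_some] at h
    rw [PySem.List.pyGet?_of_nonneg r hy] at h
    exact falseCount_modify v x.toNat y.toNat r hv h

theorem mem_cellsNM {N M x y : Int} :
    (x, y) ∈ cellsNM N M ↔ 0 ≤ x ∧ x < N ∧ 0 ≤ y ∧ y < M := by
  simp only [cellsNM, List.mem_flatMap, List.mem_map, PySem.List.mem_pyRange_one, Prod.mk.injEq]
  constructor
  · rintro ⟨i, hi, j, hj, hx, hy⟩; subst hx; subst hy; exact ⟨hi.1, hi.2, hj.1, hj.2⟩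
  · rintro ⟨h0, h1, h2, h3⟩; exact ⟨x, ⟨h0, h1⟩, y, ⟨h2, h3⟩, rfl, rfl⟩

theorem filter_notMem_append_one : ∀ (l s : List (Int × Int)) (c : Int × Int),
    c ∈ l → c ∉ s →
    (l.filter (fun p => !(decide (p ∈ s ++ [c])))).length + 1
      ≤ (l.filter (fun p => !(decide (p ∈ s)))).length := by
  intro l s c
  have himp : ∀ p : Int × Int,
      (!(decide (p ∈ s ++ [c]))) = true → (!(decide (p ∈ s))) = true := by
    intro p hp
    simp only [Bool.not_eq_true', decide_eq_false_iff_not, List.mem_append] at hp ⊢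
    exact fun h => hp (Or.inl h)
  induction l with
  | nil => intro h; simp at h
  | cons a l ih =>
    intro hc hcs
    have hmono : (l.filter (fun p => !(decide (p ∈ s ++ [c])))).length
        ≤ (l.filter (fun p => !(decide (p ∈ s)))).length :=
      (List.monotone_filter_right l himp).length_le
    by_cases hac : a = c
    · subst hac
      have e1 : (!(decide (a ∈ s ++ [a]))) = false := by simp
      have e2 : (!(decide (a ∈ s))) = true := by simpa using hcs
      rw [List.filter_cons, List.filter_cons, e1, e2]
      simp only [Bool.false_eq_true, if_false, if_true, List.length_cons]
      omega
    · have hc' : c ∈ l := by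
        rcases List.mem_cons.mp hc with h | h
        · exact absurd h.symm hac
        · exact h
      have e : (a ∈ s ++ [c]) ↔ (a ∈ s) := by
        simp only [List.mem_append, List.mem_singleton]
        constructor
        · rintro (h | h)
          · exact h
          · exact absurd h hac
        · intro h; left; exact h
      have epred : (!(decide (a ∈ s ++ [c]))) = (!(decide (a ∈ s))) := by
        rw [decide_eq_decide.mpr e]
      rw [List.filter_cons, List.filter_cons, epred]
      have := ih hc' hcs
      split_ifs
      · simp only [List.length_cons]; omega
      · omega

theorem unvis_add {N M : Int} {s : List (Int × Int)} {nx ny : Int}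
    (h0 : 0 ≤ nx) (h1 : nx < N) (h2 : 0 ≤ ny) (h3 : ny < M) (hf : (nx, ny) ∉ s) :
    unvis N M (PySem.Set.add s (nx, ny)) + 1 ≤ unvis N M s := by
  have hadd : PySem.Set.add s (nx, ny) = s ++ [(nx, ny)] := by
    simp [PySem.Set.add, PySem.Set.contains, hf]
  rw [hadd]
  exact filter_notMem_append_one (cellsNM N M) s (nx, ny)
    (mem_cellsNM.mpr ⟨h0, h1, h2, h3⟩) hf

theorem scanRow_meas (N M nx : Int) : ∀ (nys : List Int)
    (st : List (Int × Int) × PySem.Set (Int × Int)),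
    unvis N M (scanRow N M nx nys st).2 + (scanRow N M nx nys st).1.length
      ≤ unvis N M st.2 + st.1.length := by
  intro nys
  induction nys with
  | nil => intro st; simp [scanRow]
  | cons ny nys ih =>
    intro st
    obtain ⟨nxt, s⟩ := st
    simp only [scanRow]
    split
    · next hg =>
      have h1 := ih (nxt ++ [(nx, ny)], PySem.Set.add s (nx, ny))
      have h2 := unvis_add hg.1 hg.2.1 hg.2.2.1 hg.2.2.2.1 hg.2.2.2.2
      simp only [List.length_append, List.length_singleton] at h1 ⊢
      omega
    · exact ih (nxt, s)

theorem scanCell_meas (N M y : Int) : ∀ (nxs : List Int)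
    (st : List (Int × Int) × PySem.Set (Int × Int)),
    unvis N M (scanCell N M y nxs st).2 + (scanCell N M y nxs st).1.length
      ≤ unvis N M st.2 + st.1.length := by
  intro nxs
  induction nxs with
  | nil => intro st; simp [scanCell]
  | cons nx nxs ih =>
    intro st
    simp only [scanCell]
    have h1 := ih (scanRow N M nx [y - 1, y, y + 1] st)
    have h2 := scanRow_meas N M nx [y - 1, y, y + 1] st
    omega

theorem scanWave_meas (N M : Int) : ∀ (ws : List (Int × Int))
    (st : List (Int × Int) × PySem.Set (Int × Int)),
    unvis N M (scanWave N M ws st).2 + (scanWave N M ws st).1.length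
      ≤ unvis N M st.2 + st.1.length := by
  intro ws
  induction ws with
  | nil => intro st; simp [scanWave]
  | cons w ws ih =>
    intro st
    obtain ⟨x, y⟩ := w
    simp only [scanWave]
    have h1 := ih (scanCell N M y [x - 1, x, x + 1] st)
    have h2 := scanCell_meas N M y [x - 1, x, x + 1] st
    omega

-- the loops ignore the fuel on an empty queue/frontier
theorem loopA_nil (N M : Int) (fuel : Nat) (v : List (List Bool)) (md : Int) :
    loopA N M fuel [] v md = md := by
  cases fuel <;> rfl

theorem loopB_nil (N M : Int) (fuel : Nat) (s : PySem.Set (Int × Int)) (level : Int) :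
    loopB N M fuel [] s level = level := by
  cases fuel <;> rfl


-- the cross-representation invariant: the boolean matrix v (A) and the visited set s (B)
-- mark the same in-bounds cells, and v is an N×M matrix
def RelVS (N M : Int) (v : List (List Bool)) (s : List (Int × Int)) : Prop :=
  v.length = N.toNat ∧ (∀ (k : Nat) (row : List Bool), v[k]? = some row → row.length = M.toNat) ∧
  (∀ x y : Int, 0 ≤ x → x < N → 0 ≤ y → y < M → (getCell v x y = some true ↔ (x, y) ∈ s))

theorem getCell_total {N M : Int} {v : List (List Bool)} {s : List (Int × Int)}
    (hrel : RelVS N M v s) {x y : Int} (h0 : 0 ≤ x) (h1 : x < N) (h2 : 0 ≤ y) (h3 : y < M) :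
    ∃ b, getCell v x y = some b := by
  obtain ⟨hlen, hrow, _⟩ := hrel
  have hx : x.toNat < v.length := by omega
  unfold getCell
  rw [PySem.List.pyGet?_of_nonneg v h0, List.getElem?_eq_getElem hx]
  have hr := hrow x.toNat v[x.toNat] (List.getElem?_eq_getElem hx)
  have hy : y.toNat < (v[x.toNat]).length := by omega
  rw [Option.bind_some, PySem.List.pyGet?_of_nonneg _ h2, List.getElem?_eq_getElem hy]
  exact ⟨_, rfl⟩

theorem guard_iff {N M : Int} {v : List (List Bool)} {s : List (Int × Int)}
    (hrel : RelVS N M v s) {x y : Int} (h0 : 0 ≤ x) (h1 : x < N) (h2 : 0 ≤ y) (h3 : y < M) :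
    (getCell v x y = some false ↔ ¬ ((x, y) ∈ s)) := by
  obtain ⟨b, hb⟩ := getCell_total hrel h0 h1 h2 h3
  have hiff := hrel.2.2 x y h0 h1 h2 h3
  rw [hb] at hiff ⊢
  cases b
  · have hnm : ¬ ((x, y) ∈ s) := fun hm => by simpa using hiff.mpr hm
    exact ⟨fun _ => hnm, fun _ => rfl⟩
  · have hm : (x, y) ∈ s := hiff.mp rfl
    constructor
    · intro he; exact absurd he (by simp)
    · intro hn; exact absurd hm hn

theorem getCell_setCell_self {N M : Int} {v : List (List Bool)} {s : List (Int × Int)}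
    (hrel : RelVS N M v s) {x y : Int} (h0 : 0 ≤ x) (h1 : x < N) (h2 : 0 ≤ y) (h3 : y < M) :
    getCell (setCell v x y) x y = some true := by
  obtain ⟨hlen, hrow, _⟩ := hrel
  have hx : x.toNat < v.length := by omega
  have hr := hrow x.toNat v[x.toNat] (List.getElem?_eq_getElem hx)
  have hy : y.toNat < (v[x.toNat]).length := by omega
  unfold getCell setCell
  rw [PySem.List.pyGet?_of_nonneg _ h0, List.getElem?_modify, List.getElem?_eq_getElem hx]
  simp only [if_true, Option.map_eq_map, Option.map_some, Option.bind_some]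
  rw [PySem.List.pyGet?_of_nonneg _ h2, List.getElem?_set_self (by simpa using hy)]

theorem getCell_setCell_ne {v : List (List Bool)} {x y a b : Int}
    (ha : 0 ≤ a) (hb : 0 ≤ b) (hx : 0 ≤ x) (hy : 0 ≤ y) (hne : (a, b) ≠ (x, y)) :
    getCell (setCell v x y) a b = getCell v a b := by
  unfold getCell setCell
  rw [PySem.List.pyGet?_of_nonneg _ ha, PySem.List.pyGet?_of_nonneg _ ha, List.getElem?_modify]
  by_cases hax : a = x
  · subst hax
    have hby : b ≠ y := fun h => hne (by rw [h])
    rcases hrowq : v[a.toNat]? with _ | row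
    · simp
    · simp only [if_true, Option.map_eq_map, Option.map_some, Option.bind_some]
      rw [PySem.List.pyGet?_of_nonneg _ hb, PySem.List.pyGet?_of_nonneg _ hb,
        List.getElem?_set_ne (by omega)]
  · have hcond : x.toNat ≠ a.toNat := by omega
    rcases v[a.toNat]? with _ | row
    · simp
    · simp [hcond]

theorem length_setCell (v : List (List Bool)) (x y : Int) :
    (setCell v x y).length = v.length := by
  simp [setCell]

theorem RelVS_add {N M : Int} {v : List (List Bool)} {s : List (Int × Int)}
    (hrel : RelVS N M v s) {x y : Int} (h0 : 0 ≤ x) (h1 : x < N) (h2 : 0 ≤ y) (h3 : y < M) :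
    RelVS N M (setCell v x y) (PySem.Set.add s (x, y)) := by
  obtain ⟨hlen, hrow, hiff⟩ := hrel
  refine ⟨by rw [length_setCell]; exact hlen, ?_, ?_⟩
  · intro k row hk
    unfold setCell at hk
    rw [List.getElem?_modify] at hk
    rcases hr : v[k]? with _ | row0
    · rw [hr] at hk; simp [Option.map_eq_map] at hk
    · rw [hr] at hk
      simp only [Option.map_eq_map, Option.map_some, Option.some.injEq] at hk
      rw [← hk]
      split_ifs
      · rw [List.length_set]; exact hrow k row0 hr
      · exact hrow k row0 hr
  · intro a b ha0 ha1 hb0 hb1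
    rw [PySem.Set.mem_add]
    by_cases heq : (a, b) = (x, y)
    · have ha' : a = x := (Prod.ext_iff.mp heq).1
      have hb' : b = y := (Prod.ext_iff.mp heq).2
      subst ha'; subst hb'
      constructor
      · intro _; right; rfl
      · intro _; exact getCell_setCell_self ⟨hlen, hrow, hiff⟩ h0 h1 h2 h3
    · rw [getCell_setCell_ne ha0 hb0 h0 h2 heq, hiff a b ha0 ha1 hb0 hb1]
      constructor
      · intro h; left; exact h
      · rintro (h | h)
        · exact h
        · exact absurd h heq

-- generic candidate-list processors: procA is A's direction scan over absolute cells,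
-- procB is B's 3×3 scan over absolute cells; each port is bridged to its processor
def procA (N M d : Int) : List (Int × Int) → List (Int × Int × Int) → List (List Bool) →
    List (Int × Int × Int) × List (List Bool)
  | [], acc, v => (acc, v)
  | (nx, ny) :: cs, acc, v =>
    if 0 ≤ nx ∧ nx < N ∧ 0 ≤ ny ∧ ny < M ∧ getCell v nx ny = some false
    then procA N M d cs (acc ++ [(nx, ny, d + 1)]) (setCell v nx ny)
    else procA N M d cs acc v

def procB (N M : Int) : List (Int × Int) → List (Int × Int) × PySem.Set (Int × Int) →
    List (Int × Int) × PySem.Set (Int × Int)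
  | [], st => st
  | (nx, ny) :: cs, (nxt, s) =>
    if 0 ≤ nx ∧ nx < N ∧ 0 ≤ ny ∧ ny < M ∧ ¬ ((nx, ny) ∈ s)
    then procB N M cs (nxt ++ [(nx, ny)], PySem.Set.add s (nx, ny))
    else procB N M cs (nxt, s)

theorem expandA_eq_procA (N M x y dist : Int) : ∀ (ds : List (Int × Int))
    (acc : List (Int × Int × Int)) (v : List (List Bool)),
    expandA N M x y dist ds acc v
      = procA N M dist (ds.map (fun q => (x + q.1, y + q.2))) acc v := by
  intro ds
  induction ds with
  | nil => intro acc v; simp [expandA, procA]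
  | cons d ds ih =>
    intro acc v
    obtain ⟨dx, dy⟩ := d
    simp only [expandA, List.map_cons, procA]
    split
    · exact ih _ _
    · exact ih _ _

theorem scanRow_eq_procB (N M nx : Int) : ∀ (nys : List Int)
    (st : List (Int × Int) × PySem.Set (Int × Int)),
    scanRow N M nx nys st = procB N M (nys.map (fun ny => (nx, ny))) st := by
  intro nys
  induction nys with
  | nil => intro st; simp [scanRow, procB]
  | cons ny nys ih =>
    intro st
    obtain ⟨nxt, s⟩ := st
    simp only [scanRow, List.map_cons, procB]
    split
    · exact ih _
    · exact ih _

theorem procB_append (N M : Int) : ∀ (c1 c2 : List (Int × Int))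
    (st : List (Int × Int) × PySem.Set (Int × Int)),
    procB N M (c1 ++ c2) st = procB N M c2 (procB N M c1 st) := by
  intro c1
  induction c1 with
  | nil => intro c2 st; simp [procB]
  | cons c cs ih =>
    intro c2 st
    obtain ⟨nxt, s⟩ := st
    obtain ⟨nx, ny⟩ := c
    simp only [List.cons_append, procB]
    split
    · exact ih _ _
    · exact ih _ _

theorem scanCell_eq_procB (N M y : Int) : ∀ (nxs : List Int)
    (st : List (Int × Int) × PySem.Set (Int × Int)),
    scanCell N M y nxs st
      = procB N M (nxs.flatMap (fun nx => [(nx, y - 1), (nx, y), (nx, y + 1)])) st := by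
  intro nxs
  induction nxs with
  | nil => intro st; simp [scanCell, procB]
  | cons nx nxs ih =>
    intro st
    simp only [scanCell, List.flatMap_cons, procB_append]
    rw [ih, scanRow_eq_procB]
    simp

-- the set only grows
theorem procB_mono (N M : Int) : ∀ (cells : List (Int × Int))
    (st : List (Int × Int) × PySem.Set (Int × Int)) (c : Int × Int),
    c ∈ st.2 → c ∈ (procB N M cells st).2 := by
  intro cells
  induction cells with
  | nil => intro st c h; simpa [procB] using h
  | cons p cs ih =>
    intro st c h
    obtain ⟨nxt, s⟩ := st
    obtain ⟨nx, ny⟩ := p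
    simp only [procB]
    split
    · exact ih _ c (by rw [PySem.Set.mem_add]; left; exact h)
    · exact ih _ c h

-- cells already collected stay inside the set
theorem procB_acc_sub (N M : Int) : ∀ (cells : List (Int × Int))
    (nxt : List (Int × Int)) (s : PySem.Set (Int × Int)),
    (∀ c ∈ nxt, c ∈ s) →
    ∀ c ∈ (procB N M cells (nxt, s)).1, c ∈ (procB N M cells (nxt, s)).2 := by
  intro cells
  induction cells with
  | nil => intro nxt s h c hc; exact h c (by simpa [procB] using hc)
  | cons p cs ih =>
    intro nxt s h c hc
    obtain ⟨nx, ny⟩ := p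
    simp only [procB] at hc ⊢
    by_cases hg : 0 ≤ nx ∧ nx < N ∧ 0 ≤ ny ∧ ny < M ∧ ¬ ((nx, ny) ∈ s)
    · rw [if_pos hg] at hc ⊢
      refine ih _ _ ?_ c hc
      intro z hz
      rw [PySem.Set.mem_add]
      rcases List.mem_append.mp hz with h1 | h1
      · left; exact h z h1
      · right; simpa using h1
    · rw [if_neg hg] at hc ⊢
      exact ih _ _ h c hc

-- a candidate already in the set is skipped
theorem procB_skip (N M : Int) (c : Int × Int) (cs : List (Int × Int))
    (st : List (Int × Int) × PySem.Set (Int × Int)) (h : c ∈ st.2) :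
    procB N M (c :: cs) st = procB N M cs st := by
  obtain ⟨nxt, s⟩ := st
  obtain ⟨nx, ny⟩ := c
  simp only [procB]
  rw [if_neg]
  rintro ⟨-, -, -, -, hmem⟩
  exact hmem h

-- A's scan and B's scan over the SAME candidate list produce the same new cells
-- (B's decorated with dist+1) and related states
theorem procAB (N M d : Int) : ∀ (cells : List (Int × Int)) (acc : List (Int × Int))
    (v : List (List Bool)) (s : PySem.Set (Int × Int)), RelVS N M v s →
    (procA N M d cells (acc.map (fun p => (p.1, p.2, d + 1))) v).1
      = (procB N M cells (acc, s)).1.map (fun p => (p.1, p.2, d + 1))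
    ∧ RelVS N M (procA N M d cells (acc.map (fun p => (p.1, p.2, d + 1))) v).2
        (procB N M cells (acc, s)).2 := by
  intro cells
  induction cells with
  | nil => intro acc v s hrel; exact ⟨by simp [procA, procB], by simpa [procA, procB] using hrel⟩
  | cons p cs ih =>
    intro acc v s hrel
    obtain ⟨nx, ny⟩ := p
    simp only [procA, procB]
    by_cases hin : 0 ≤ nx ∧ nx < N ∧ 0 ≤ ny ∧ ny < M
    · obtain ⟨h0, h1, h2, h3⟩ := hin
      have hg := guard_iff hrel h0 h1 h2 h3
      by_cases hmem : (nx, ny) ∈ s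
      · rw [if_neg (by rintro ⟨-, -, -, -, hf⟩; exact (hg.mp hf) hmem),
          if_neg (by rintro ⟨-, -, -, -, hf⟩; exact hf hmem)]
        exact ih acc v s hrel
      · rw [if_pos ⟨h0, h1, h2, h3, hg.mpr hmem⟩, if_pos ⟨h0, h1, h2, h3, hmem⟩]
        have hpush : acc.map (fun p => (p.1, p.2, d + 1)) ++ [(nx, ny, d + 1)]
            = (acc ++ [(nx, ny)]).map (fun p => (p.1, p.2, d + 1)) := by simp
        rw [hpush]
        exact ih (acc ++ [(nx, ny)]) (setCell v nx ny) (PySem.Set.add s (nx, ny))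
          (RelVS_add hrel h0 h1 h2 h3)
    · rw [if_neg (by rintro ⟨h0, h1, h2, h3, -⟩; exact hin ⟨h0, h1, h2, h3⟩),
        if_neg (by rintro ⟨h0, h1, h2, h3, -⟩; exact hin ⟨h0, h1, h2, h3⟩)]
      exact ih acc v s hrel

-- falseCount bookkeeping for the generic A-side scan (fuel for the simulation)
theorem procA_falseCount (N M d : Int) : ∀ (cells : List (Int × Int))
    (acc : List (Int × Int × Int)) (v : List (List Bool)),
    falseCount (procA N M d cells acc v).2 + (procA N M d cells acc v).1.length
      = falseCount v + acc.length := by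
  intro cells
  induction cells with
  | nil => intro acc v; simp [procA]
  | cons p cs ih =>
    intro acc v
    obtain ⟨nx, ny⟩ := p
    simp only [procA]
    split
    · next hg =>
      have := ih (acc ++ [(nx, ny, d + 1)]) (setCell v nx ny)
      have h2 := falseCount_set hg.1 hg.2.2.1 hg.2.2.2.2
      simp only [List.length_append, List.length_cons, List.length_nil] at this ⊢
      omega
    · exact ih acc v

-- B's per-cell 3×3 candidate list is A's shifted direction list with the (skipped) centre inserted
theorem cell_candidates (x y : Int) :
    ([x - 1, x, x + 1].flatMap (fun nx => [(nx, y - 1), (nx, y), (nx, y + 1)]))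
      = [(x - 1, y - 1), (x - 1, y), (x - 1, y + 1), (x, y - 1)]
        ++ [(x, y)] ++ [(x, y + 1), (x + 1, y - 1), (x + 1, y), (x + 1, y + 1)] := by
  simp [List.flatMap]

theorem dirs_shifted (x y : Int) :
    (directions8.map (fun q => (x + q.1, y + q.2)))
      = [(x - 1, y - 1), (x - 1, y), (x - 1, y + 1), (x, y - 1)]
        ++ [(x, y + 1), (x + 1, y - 1), (x + 1, y), (x + 1, y + 1)] := by
  simp only [directions8, List.map_cons, List.map_nil]
  norm_num [sub_eq_add_neg]

-- per frontier cell (already in s): B's scanCell = procB over A's 8 shifted candidates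
theorem scanCell_eq_eight (N M x y : Int) (nxt : List (Int × Int))
    (s : PySem.Set (Int × Int)) (hc : (x, y) ∈ s) :
    scanCell N M y [x - 1, x, x + 1] (nxt, s)
      = procB N M (directions8.map (fun q => (x + q.1, y + q.2))) (nxt, s) := by
  rw [scanCell_eq_procB, cell_candidates, dirs_shifted, procB_append, procB_append,
    procB_append]
  congr 1
  exact procB_skip N M (x, y) [] _ (procB_mono N M _ (nxt, s) (x, y) hc)

-- the collected cells factor out of the accumulator
theorem procB_acc_shift (N M : Int) : ∀ (cells : List (Int × Int))
    (a b : List (Int × Int)) (s : PySem.Set (Int × Int)),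
    procB N M cells (a ++ b, s)
      = (a ++ (procB N M cells (b, s)).1, (procB N M cells (b, s)).2) := by
  intro cells
  induction cells with
  | nil => intro a b s; simp [procB]
  | cons p cs ih =>
    intro a b s
    obtain ⟨nx, ny⟩ := p
    simp only [procB]
    split
    · rw [List.append_assoc]
      exact ih a (b ++ [(nx, ny)]) (PySem.Set.add s (nx, ny))
    · exact ih a b s

-- the wave simulation: A's deque holding the rest of wave d (at distance d, max-so-far d)
-- plus the collected part of wave d+1 finishes exactly one below B's final level counter
theorem wave_sim : ∀ (fuelA : Nat) (N M : Int) (fuelB : Nat) (wave nxt : List (Int × Int))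
    (v : List (List Bool)) (s : PySem.Set (Int × Int)) (d : Int),
    RelVS N M v s → (∀ c ∈ wave, c ∈ s) → (∀ c ∈ nxt, c ∈ s) →
    falseCount v + wave.length + nxt.length ≤ fuelA →
    unvis N M (scanWave N M wave (nxt, s)).2 + (scanWave N M wave (nxt, s)).1.length ≤ fuelB →
    loopA N M fuelA (wave.map (fun p => (p.1, p.2, d)) ++ nxt.map (fun p => (p.1, p.2, d + 1))) v d
      = loopB N M fuelB (scanWave N M wave (nxt, s)).1 (scanWave N M wave (nxt, s)).2 (d + 1) - 1 := by
  intro fuelA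
  induction fuelA with
  | zero =>
    intro N M fuelB wave nxt v s d hrel hw hn hA hB
    have hw0 : wave = [] := List.length_eq_zero_iff.mp (by omega)
    have hn0 : nxt = [] := List.length_eq_zero_iff.mp (by omega)
    subst hw0; subst hn0
    simp [loopA, scanWave, loopB_nil]
  | succ fA ih =>
    intro N M fuelB wave nxt v s d hrel hw hn hA hB
    match wave with
    | (cx, cy) :: wave' =>
      have hctr : (cx, cy) ∈ s := hw (cx, cy) (by simp)
      -- A pops the head of the current wave
      simp only [List.map_cons, List.cons_append, loopA, max_self]
      rw [expandA_eq_procA]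
      -- relate the two scans over the same eight candidates
      have hAB := procAB N M d (directions8.map (fun q => (cx + q.1, cy + q.2))) [] v s hrel
      simp only [List.map_nil] at hAB
      obtain ⟨hfst, hrel'⟩ := hAB
      set new := (procB N M (directions8.map (fun q => (cx + q.1, cy + q.2))) ([], s)).1 with hnew
      set s' := (procB N M (directions8.map (fun q => (cx + q.1, cy + q.2))) ([], s)).2 with hs'
      have hmono : ∀ c ∈ s, c ∈ s' :=
        fun c hc => procB_mono N M _ ([], s) c hc
      have hnsub : ∀ c ∈ new, c ∈ s' :=
        procB_acc_sub N M _ [] s (by simp)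
      -- B's scanWave peels the same cell
      have hcell := scanCell_eq_eight N M cx cy nxt s hctr
      have hshift := procB_acc_shift N M (directions8.map (fun q => (cx + q.1, cy + q.2))) nxt [] s
      simp only [List.append_nil] at hshift
      have hpeel : scanWave N M ((cx, cy) :: wave') (nxt, s)
          = scanWave N M wave' (nxt ++ new, s') := by
        simp only [scanWave, hcell, hshift, ← hnew, ← hs']
      have hq : (wave'.map (fun p => (p.1, p.2, d)) ++ nxt.map (fun p => (p.1, p.2, d + 1)))
            ++ (procA N M d (directions8.map (fun q => (cx + q.1, cy + q.2))) [] v).1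
          = wave'.map (fun p => (p.1, p.2, d)) ++ (nxt ++ new).map (fun p => (p.1, p.2, d + 1)) := by
        rw [hfst]
        simp [List.append_assoc]
      rw [hq]
      have hfc := procA_falseCount N M d (directions8.map (fun q => (cx + q.1, cy + q.2))) [] v
      simp only [List.length_nil, Nat.add_zero] at hfc
      have hlen : new.length = (procA N M d (directions8.map (fun q => (cx + q.1, cy + q.2))) [] v).1.length := by
        rw [hfst]; simp [hnew]
      rw [hpeel] at hB
      rw [ih N M fuelB wave' (nxt ++ new) _ s' d hrel'
        (fun c hc => hmono c (hw c (by simp [hc])))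
        (fun c hc => by
          rcases List.mem_append.mp hc with h1 | h1
          · exact hmono c (hn c h1)
          · exact hnsub c h1)
        (by
          simp only [List.length_cons, List.length_append] at hA ⊢
          omega)
        hB]
      rw [hpeel]
    | [] =>
      match nxt with
      | [] => simp [loopA, scanWave, loopB_nil]
      | (cx, cy) :: rest =>
        have hctr : (cx, cy) ∈ s := hn (cx, cy) (by simp)
        have hswid : scanWave N M ([] : List (Int × Int)) ((cx, cy) :: rest, s)
            = ((cx, cy) :: rest, s) := rfl
        rw [hswid] at hB ⊢
        -- B consumes the nonempty frontier: fuelB is positive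
        rcases fuelB with _ | fB
        · exfalso
          simp only [List.length_cons] at hB
          omega
        -- A starts the next wave: max d (d+1) = d+1
        simp only [List.map_nil, List.nil_append, List.map_cons, loopA]
        have hmax : max d (d + 1) = d + 1 := by omega
        rw [hmax, expandA_eq_procA]
        have hAB := procAB N M (d + 1) (directions8.map (fun q => (cx + q.1, cy + q.2))) [] v s hrel
        simp only [List.map_nil] at hAB
        obtain ⟨hfst, hrel'⟩ := hAB
        set new := (procB N M (directions8.map (fun q => (cx + q.1, cy + q.2))) ([], s)).1 with hnew
        set s' := (procB N M (directions8.map (fun q => (cx + q.1, cy + q.2))) ([], s)).2 with hs'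
        have hmono : ∀ c ∈ s, c ∈ s' :=
          fun c hc => procB_mono N M _ ([], s) c hc
        have hnsub : ∀ c ∈ new, c ∈ s' :=
          procB_acc_sub N M _ [] s (by simp)
        have hcell := scanCell_eq_eight N M cx cy [] s hctr
        have hpeel : scanWave N M ((cx, cy) :: rest) (([] : List (Int × Int)), s)
            = scanWave N M rest (new, s') := by
          simp only [scanWave, hcell]
          rw [Prod.mk.eta]
        have hq : rest.map (fun p => (p.1, p.2, d + 1))
              ++ (procA N M (d + 1) (directions8.map (fun q => (cx + q.1, cy + q.2))) [] v).1
            = rest.map (fun p => (p.1, p.2, d + 1)) ++ new.map (fun p => (p.1, p.2, d + 1 + 1)) := by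
          rw [hfst]
        rw [hq]
        have hfc := procA_falseCount N M (d + 1) (directions8.map (fun q => (cx + q.1, cy + q.2))) [] v
        simp only [List.length_nil, Nat.add_zero] at hfc
        have hlen : new.length = (procA N M (d + 1) (directions8.map (fun q => (cx + q.1, cy + q.2))) [] v).1.length := by
          rw [hfst]; simp [hnew]
        have hmeas := scanWave_meas N M ((cx, cy) :: rest) ([], s)
        rw [hpeel] at hmeas
        simp only [List.length_nil, Nat.add_zero] at hmeas
        rw [ih N M fB rest new _ s' (d + 1) hrel'
          (fun c hc => hmono c (hn c (by simp [hc])))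
          hnsub
          (by
            simp only [List.length_cons] at hA
            omega)
          (by
            simp only [List.length_cons] at hB
            omega)]
        -- B's side: loopB steps once on the nonempty frontier
        conv_rhs => rw [loopB]
        rw [hpeel]

-- ===== initialisation =====

theorem set_update_append {α : Type} [BEq α] (s : PySem.Set α) (l1 l2 : List α) :
    PySem.Set.update s (l1 ++ l2) = PySem.Set.update (PySem.Set.update s l1) l2 := by
  simp [PySem.Set.update, List.foldl_append]

-- predicate "grid[i][j] == 1" shared shape of both initial scans
theorem initRow_sim (grid : List (List Int)) (N M : Int) (i : Int)
    (hi : 0 ≤ i ∧ i < N) : ∀ (lj : List Int), (∀ j ∈ lj, 0 ≤ j ∧ j < M) →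
    ∀ (q : List (Int × Int)) (v : List (List Bool)) (s : PySem.Set (Int × Int)),
    RelVS N M v s →
    (lj.foldl (fun st j =>
        if ((PySem.List.pyGet? grid i).bind (fun row => PySem.List.pyGet? row j)) = some 1
        then (st.1 ++ [(i, j, (0 : Int))], setCell st.2 i j)
        else st) (q.map (fun p => (p.1, p.2, (0 : Int))), v)).1
      = (q ++ (lj.filter (fun j =>
          decide (((PySem.List.pyGet? grid i).bind (fun row => PySem.List.pyGet? row j)) = some 1))).map
          (fun j => (i, j))).map (fun p => (p.1, p.2, (0 : Int)))
    ∧ RelVS N M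
        (lj.foldl (fun st j =>
          if ((PySem.List.pyGet? grid i).bind (fun row => PySem.List.pyGet? row j)) = some 1
          then (st.1 ++ [(i, j, (0 : Int))], setCell st.2 i j)
          else st) (q.map (fun p => (p.1, p.2, (0 : Int))), v)).2
        (PySem.Set.update s ((lj.filter (fun j =>
          decide (((PySem.List.pyGet? grid i).bind (fun row => PySem.List.pyGet? row j)) = some 1))).map
          (fun j => (i, j)))) := by
  intro lj
  induction lj with
  | nil => intro hj q v s hrel; exact ⟨by simp, by simpa [PySem.Set.update] using hrel⟩
  | cons j lj ihj =>
    intro hj q v s hrel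
    have hjb := hj j (by simp)
    simp only [List.foldl_cons, List.filter_cons]
    by_cases hhit : ((PySem.List.pyGet? grid i).bind (fun row => PySem.List.pyGet? row j)) = some 1
    · simp only [hhit, if_pos, decide_true]
      have hpush : q.map (fun p => (p.1, p.2, (0 : Int))) ++ [(i, j, (0 : Int))]
          = (q ++ [(i, j)]).map (fun p => (p.1, p.2, (0 : Int))) := by simp
      rw [hpush]
      have := ihj (fun z hz => hj z (by simp [hz])) (q ++ [(i, j)]) (setCell v i j)
        (PySem.Set.add s (i, j)) (RelVS_add hrel hi.1 hi.2 hjb.1 hjb.2)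
      refine ⟨?_, ?_⟩
      · rw [this.1]; simp
      · have h2 := this.2
        simpa [PySem.Set.update] using h2
    · simp only [hhit, decide_false, Bool.false_eq_true, if_false]
      exact ihj (fun z hz => hj z (by simp [hz])) q v s hrel

theorem init_sim (grid : List (List Int)) (N M : Int) : ∀ (li : List Int),
    (∀ i ∈ li, 0 ≤ i ∧ i < N) →
    ∀ (q : List (Int × Int)) (v : List (List Bool)) (s : PySem.Set (Int × Int)),
    RelVS N M v s →
    (li.foldl (fun st i =>
        (PySem.List.pyRange 0 M 1).foldl (fun st j =>
          if ((PySem.List.pyGet? grid i).bind (fun row => PySem.List.pyGet? row j)) = some 1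
          then (st.1 ++ [(i, j, (0 : Int))], setCell st.2 i j)
          else st) st) (q.map (fun p => (p.1, p.2, (0 : Int))), v)).1
      = (q ++ li.flatMap (fun i =>
          ((PySem.List.pyRange 0 M 1).filter (fun j =>
            decide (((PySem.List.pyGet? grid i).bind (fun row => PySem.List.pyGet? row j)) = some 1))).map
            (fun j => (i, j)))).map (fun p => (p.1, p.2, (0 : Int)))
    ∧ RelVS N M
        (li.foldl (fun st i =>
          (PySem.List.pyRange 0 M 1).foldl (fun st j =>
            if ((PySem.List.pyGet? grid i).bind (fun row => PySem.List.pyGet? row j)) = some 1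
            then (st.1 ++ [(i, j, (0 : Int))], setCell st.2 i j)
            else st) st) (q.map (fun p => (p.1, p.2, (0 : Int))), v)).2
        (PySem.Set.update s (li.flatMap (fun i =>
          ((PySem.List.pyRange 0 M 1).filter (fun j =>
            decide (((PySem.List.pyGet? grid i).bind (fun row => PySem.List.pyGet? row j)) = some 1))).map
            (fun j => (i, j))))) := by
  intro li
  induction li with
  | nil => intro hi q v s hrel; exact ⟨by simp, by simpa [PySem.Set.update] using hrel⟩
  | cons i li ihl =>
    intro hi q v s hrel
    have hib := hi i (by simp)
    have hrowsim := initRow_sim grid N M i hib (PySem.List.pyRange 0 M 1)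
      (fun j hj => by
        have := (PySem.List.mem_pyRange_one).mp hj
        omega) q v s hrel
    simp only [List.foldl_cons, List.flatMap_cons]
    rcases hst : ((PySem.List.pyRange 0 M 1).foldl (fun st j =>
        if ((PySem.List.pyGet? grid i).bind (fun row => PySem.List.pyGet? row j)) = some 1
        then (st.1 ++ [(i, j, (0 : Int))], setCell st.2 i j)
        else st) (q.map (fun p => (p.1, p.2, (0 : Int))), v)) with ⟨q1, v1⟩
    rw [hst] at hrowsim
    obtain ⟨hq1, hrel1⟩ := hrowsim
    have hq1' : q1 = (q ++ ((PySem.List.pyRange 0 M 1).filter (fun j =>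
        decide (((PySem.List.pyGet? grid i).bind (fun row => PySem.List.pyGet? row j)) = some 1))).map
        (fun j => (i, j))).map (fun p => (p.1, p.2, (0 : Int))) := hq1
    rw [hst, hq1']
    have := ihl (fun z hz => hi z (by simp [hz]))
      (q ++ ((PySem.List.pyRange 0 M 1).filter (fun j =>
        decide (((PySem.List.pyGet? grid i).bind (fun row => PySem.List.pyGet? row j)) = some 1))).map
        (fun j => (i, j))) v1 _ hrel1
    refine ⟨?_, ?_⟩
    · rw [this.1]; simp
    · have h2 := this.2
      rw [set_update_append]
      exact h2

-- the fresh N×M matrix of Falses is related to the empty set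
theorem RelVS_init (N M : Int) :
    RelVS N M ((PySem.List.pyRange 0 N 1).map (fun _ =>
      (PySem.List.pyRange 0 M 1).map (fun _ => false))) [] := by
  refine ⟨by simp [PySem.List.length_pyRange_one], ?_, ?_⟩
  · intro k row hk
    rcases List.getElem?_eq_some_iff.mp hk with ⟨hlt, hval⟩
    rw [List.getElem_map] at hval
    rw [← hval]
    simp [PySem.List.length_pyRange_one]
  · intro x y h0 h1 h2 h3
    simp only [List.not_mem_nil, iff_false]
    intro hcell
    unfold getCell at hcell
    rw [PySem.List.pyGet?_of_nonneg _ h0] at hcell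
    have hx : x.toNat < ((PySem.List.pyRange 0 N 1).map (fun _ =>
        (PySem.List.pyRange 0 M 1).map (fun _ => false))).length := by
      simp [PySem.List.length_pyRange_one]; omega
    rw [List.getElem?_eq_getElem hx, List.getElem_map] at hcell
    simp only [Option.bind_some] at hcell
    rw [PySem.List.pyGet?_of_nonneg _ h2] at hcell
    have hy : y.toNat < ((PySem.List.pyRange 0 M 1).map (fun _ => false)).length := by
      simp [PySem.List.length_pyRange_one]; omega
    rw [List.getElem?_eq_getElem hy, List.getElem_map] at hcell
    simp at hcell

-- every shark is in set(sharks)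
theorem mem_ofList_self {α : Type} [BEq α] [LawfulBEq α] (xs : List α) (c : α) (h : c ∈ xs) :
    c ∈ PySem.Set.ofList xs := (PySem.Set.mem_ofList xs c).mpr h

-- ===== VERDICT (by name: the statement is the Claim_ definition above) =====
theorem bfs_spec : Claim_equal_bfs := by
  intro grid N M _ _
  unfold Spec_bfs
  have hA : bfs grid N M
      = loopA N M (falseCount (initA grid N M).2 + (initA grid N M).1.length)
          (initA grid N M).1 (initA grid N M).2 0 := rfl
  have hB : bfs_alt grid N M
      = (if (sharksB grid N M).isEmpty then 0
         else loopB N M (unvis N M (PySem.Set.ofList (sharksB grid N M)) + (sharksB grid N M).length)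
                (sharksB grid N M) (PySem.Set.ofList (sharksB grid N M)) 0 - 1) := rfl
  rw [hA, hB]
  have hinit := init_sim grid N M (PySem.List.pyRange 0 N 1)
    (fun i hi => by
      have := (PySem.List.mem_pyRange_one).mp hi
      omega) [] _ [] (RelVS_init N M)
  simp only [List.map_nil, List.nil_append] at hinit
  obtain ⟨hq, hrel⟩ := hinit
  have hsh : (initA grid N M).1 = (sharksB grid N M).map (fun p => (p.1, p.2, (0 : Int))) := by
    unfold initA sharksB
    exact hq
  have hrel' : RelVS N M (initA grid N M).2 (PySem.Set.ofList (sharksB grid N M)) := by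
    unfold initA sharksB
    rw [PySem.Set.ofList_eq_foldl]
    exact hrel
  rcases hcase : sharksB grid N M with _ | ⟨c, cs⟩
  · -- no sharks: A's queue is empty, B returns 0
    rw [hsh, hcase]
    simp [loopA_nil]
  · -- sharks: run the wave simulation from distance 0
    rw [hsh, hcase]
    rw [hcase] at hrel'
    have hsub : ∀ z ∈ c :: cs, z ∈ PySem.Set.ofList (c :: cs) :=
      fun z hz => mem_ofList_self _ z hz
    -- B's top-level fuel is positive: unfold its first iteration
    have hmeas := scanWave_meas N M (c :: cs) ([], PySem.Set.ofList (c :: cs))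
    simp only [List.length_nil, Nat.add_zero] at hmeas
    have hmain := wave_sim
      (falseCount (initA grid N M).2 + ((c :: cs).map (fun p => (p.1, p.2, (0 : Int)))).length)
      N M (unvis N M (PySem.Set.ofList (c :: cs)) + cs.length)
      (c :: cs) [] (initA grid N M).2 (PySem.Set.ofList (c :: cs)) 0
      hrel' hsub (by simp) (by simp) (by omega)
    simp only [List.map_nil, List.append_nil] at hmain
    rw [hmain]
    simp only [List.isEmpty_cons, Bool.false_eq_true, if_false, List.length_cons]
    have hfuel : unvis N M (PySem.Set.ofList (c :: cs)) + (cs.length + 1)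
        = (unvis N M (PySem.Set.ofList (c :: cs)) + cs.length) + 1 := by omega
    rw [hfuel]
    conv_rhs => rw [loopB]
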